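-- pv_equiv track=rewrite | github.com/rhishmapandey/Sim8085 | emu.py | ln2comp
-- ===== SOURCE A (Python) =====
-- def ln2comp(val):
--     t = (val)&0x0f
--     r = 0x0
--     for i in range(4):
--         if ((t&(0x1<<i)) == 0):
--             r = r | 0x1<<i
--     r = r+1
--     return r&val
-- ===== SOURCE B (Python) =====
-- def ln2comp(val):
--     n = val & 0x0f
--     r = (n ^ 0x0f) + 1
--     return r & val
-- ===== Notes on version B (the rewrite author's own statement) =====
-- stated objective: simpler
-- what changed: Replaced the 4-iteration bit-by-bit loop that builds the complement of the lower nibble with the closed-form XOR identity (val & 0xf) ^ 0xf, keeping the +1 and the final & val.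
import Mathlib
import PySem

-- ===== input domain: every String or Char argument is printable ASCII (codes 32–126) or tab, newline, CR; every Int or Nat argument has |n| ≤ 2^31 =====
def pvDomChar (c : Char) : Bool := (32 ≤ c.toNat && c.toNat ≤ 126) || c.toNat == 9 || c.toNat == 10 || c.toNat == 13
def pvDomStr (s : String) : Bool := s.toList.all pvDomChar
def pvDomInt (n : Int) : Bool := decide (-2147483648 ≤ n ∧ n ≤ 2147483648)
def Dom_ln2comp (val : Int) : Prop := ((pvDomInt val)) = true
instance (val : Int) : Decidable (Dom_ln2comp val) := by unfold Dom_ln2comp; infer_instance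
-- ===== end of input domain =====

-- B replaces A's 4-iteration zero-bit-collecting loop by the closed-form nibble complement (val & 0xF) ^ 0xF; objective: simpler.

-- ===== PORT A =====
def ln2comp (val : Int) : Int :=
  let t : Int := PySem.Int.band val 0x0f
  let r : Int :=
    (PySem.List.pyRange 0 4 1).foldl
      (fun r i => if PySem.Int.band t ((0x1 : Int) <<< i.toNat) == 0
                  then PySem.Int.bor r ((0x1 : Int) <<< i.toNat) else r)
      0x0
  let r := r + 1
  PySem.Int.band r val

-- ===== PORT B =====
def ln2comp_alt (val : Int) : Int :=
  let n : Int := PySem.Int.band val 0x0f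
  let r : Int := PySem.Int.bxor n 0x0f + 1
  PySem.Int.band r val

-- ===== PRECONDITION & SPEC =====
def Spec_ln2comp (val : Int) (out : Int) : Prop := out = ln2comp_alt val
instance (val : Int) (out : Int) : Decidable (Spec_ln2comp val out) := by unfold Spec_ln2comp; infer_instance

-- ===== CLAIM (what is proved, stated in full; the proofs are below) =====
def Claim_equal_ln2comp : Prop := ∀ (val : Int), Dom_ln2comp val → Spec_ln2comp val (ln2comp val)

-- ===== LEMMAS AND PROOFS =====

theorem ln2comp_band15_bounds (val : Int) :
    0 ≤ PySem.Int.band val 15 ∧ PySem.Int.band val 15 < 16 := by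
  simp only [PySem.Int.band]
  split_ifs with h1 h2 h3
  · have := Nat.and_le_right (n := val.toNat) (m := (15 : Int).toNat)
    omega
  · omega
  · have := Nat.sub_le ((15 : Int).toNat) ((15 : Int).toNat &&& (-val - 1).toNat)
    omega
  · omega

theorem ln2comp_loop_eq (t : Int) (h0 : 0 ≤ t) (h16 : t < 16) :
    (PySem.List.pyRange 0 4 1).foldl
      (fun r i => if PySem.Int.band t ((0x1 : Int) <<< i.toNat) == 0
                  then PySem.Int.bor r ((0x1 : Int) <<< i.toNat) else r)
      0x0 = PySem.Int.bxor t 0x0f := by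
  interval_cases t <;> decide

theorem ln2comp_eq_alt (val : Int) : ln2comp val = ln2comp_alt val := by
  obtain ⟨h0, h16⟩ := ln2comp_band15_bounds val
  simp only [ln2comp, ln2comp_alt, ln2comp_loop_eq (PySem.Int.band val 0x0f) h0 h16]

-- ===== VERDICT (by name: the statement is the Claim_ definition above) =====
theorem ln2comp_spec : Claim_equal_ln2comp := by
  intro val _
  exact ln2comp_eq_alt val
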